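-- pv_equiv track=rewrite | github.com/nomadlife/project-euler | p112.py | isbouncy
-- ===== SOURCE A (Python) =====
-- def isbouncy(num):
--     text = str(num)
--     inc = True
--     for k,v in enumerate(text):
--         if k==0:
--             continue
--         if text[k-1] <= v:
--             continue
--         else:
--             inc = False
--     dec = True
--     for k,v in enumerate(text):
--         if k==0:
--             continue
--         if text[k-1] >= v:
--             continue
--         else:
--             dec = False
--     if inc or dec:
--         return False
--     else:
--         return True
-- ===== SOURCE B (Python) =====
-- def isbouncy(num):
--     s = str(num)
--     inc = s == ''.join(sorted(s))
--     dec = s == ''.join(sorted(s, reverse=True))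
--     return not (inc or dec)
-- ===== Notes on version B (the rewrite author's own statement) =====
-- stated objective: idiomatic
-- what changed: Replaces the two index-based adjacent-pair scans over enumerate(str(num)) with sorting the digit string once each way and comparing it to the original (monotone iff equal to its (reverse-)sorted form).
import Mathlib
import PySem

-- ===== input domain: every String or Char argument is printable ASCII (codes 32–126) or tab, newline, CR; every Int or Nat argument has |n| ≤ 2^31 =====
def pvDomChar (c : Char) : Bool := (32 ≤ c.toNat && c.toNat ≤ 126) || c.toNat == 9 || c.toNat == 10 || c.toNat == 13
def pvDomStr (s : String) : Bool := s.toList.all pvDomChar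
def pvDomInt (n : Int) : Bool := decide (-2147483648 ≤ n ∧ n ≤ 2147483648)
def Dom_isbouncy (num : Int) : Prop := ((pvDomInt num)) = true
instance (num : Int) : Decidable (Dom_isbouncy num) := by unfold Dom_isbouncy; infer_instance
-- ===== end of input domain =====

-- B replaces A's two index-based adjacent-pair scans with sorting str(num) once each
-- way and comparing against the original (same result; objective: more idiomatic).

-- ===== PORT A =====
-- one step of the first loop: k==0 → continue; text[k-1] <= v → continue; else inc = False
def pvStepInc (text : List Char) (inc : Bool) (kv : Int × Char) : Bool :=
  if kv.1 == 0 then inc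
  else match PySem.List.pyGet? text (kv.1 - 1) with
    | some c => if decide (c ≤ kv.2) then inc else false
    | none => inc   -- unreachable: in the loop 1 ≤ k < len(text)

-- one step of the second loop (text[k-1] >= v)
def pvStepDec (text : List Char) (dec : Bool) (kv : Int × Char) : Bool :=
  if kv.1 == 0 then dec
  else match PySem.List.pyGet? text (kv.1 - 1) with
    | some c => if decide (kv.2 ≤ c) then dec else false
    | none => dec   -- unreachable

def isbouncy (num : Int) : Bool :=
  let text := PySem.Int.toChars num
  let inc := (PySem.List.enumerate text).foldl (pvStepInc text) true
  let dec := (PySem.List.enumerate text).foldl (pvStepDec text) true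
  if inc || dec then false else true

-- ===== PORT B =====
def isbouncy_alt (num : Int) : Bool :=
  let s := PySem.Int.toChars num
  let inc := s == PySem.List.sorted s (fun x => x) false
  let dec := s == PySem.List.sorted s (fun x => x) true
  !(inc || dec)

-- ===== PRECONDITION & SPEC =====
def Spec_isbouncy (num : Int) (out : Bool) : Prop := out = isbouncy_alt num
instance (num : Int) (out : Bool) : Decidable (Spec_isbouncy num out) := by unfold Spec_isbouncy; infer_instance

-- ===== CLAIM (what is proved, stated in full; the proofs are below) =====
def Claim_equal_isbouncy : Prop := ∀ (num : Int), Dom_isbouncy num → Spec_isbouncy num (isbouncy num)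

-- ===== LEMMAS AND PROOFS =====

-- the loop step is "accumulator AND guard"
def pvGuard (r : Char → Char → Bool) (text : List Char) (kv : Int × Char) : Bool :=
  kv.1 == 0 ||
    (match PySem.List.pyGet? text (kv.1 - 1) with
     | some c => r c kv.2
     | none => true)

theorem stepInc_eq (t : List Char) (b : Bool) (kv : Int × Char) :
    pvStepInc t b kv = (b && pvGuard (fun c v => decide (c ≤ v)) t kv) := by
  unfold pvStepInc pvGuard
  rcases kv with ⟨k, v⟩
  by_cases hk : k == 0
  · simp [hk]
  · simp only [hk, Bool.false_eq_true, if_false]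
    cases h : PySem.List.pyGet? t (k - 1) with
    | none => simp
    | some c => by_cases hc : c ≤ v <;> simp [hc]

theorem stepDec_eq (t : List Char) (b : Bool) (kv : Int × Char) :
    pvStepDec t b kv = (b && pvGuard (fun c v => decide (v ≤ c)) t kv) := by
  unfold pvStepDec pvGuard
  rcases kv with ⟨k, v⟩
  by_cases hk : k == 0
  · simp [hk]
  · simp only [hk, Bool.false_eq_true, if_false]
    cases h : PySem.List.pyGet? t (k - 1) with
    | none => simp
    | some c => by_cases hc : v ≤ c <;> simp [hc]

theorem foldl_and_all {α : Type} (g : α → Bool) (l : List α) (b : Bool) :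
    l.foldl (fun acc p => acc && g p) b = (b && l.all g) := by
  induction l generalizing b with
  | nil => simp
  | cons p l ih => simp [List.foldl, ih, Bool.and_assoc]

-- the loop over enumerate text computes "every adjacent pair satisfies r"
theorem loop_all (r : Char → Char → Bool) (s : List Char) :
    ((PySem.List.enumerate s).all (pvGuard r s) = true) ↔
      ∀ i : Nat, (h : i + 1 < s.length) → r s[i] s[i + 1] = true := by
  rw [List.all_eq_true]
  constructor
  · intro H i h
    have hm : ((i + 1 : Int), s[i + 1]) ∈ PySem.List.enumerate s := by
      rw [PySem.List.mem_enumerate_iff]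
      exact ⟨i + 1, h, by push_cast; ring_nf⟩
    have := H _ hm
    unfold pvGuard at this
    simp only [show ((i + 1 : Int)) - 1 = ((i : Nat) : Int) by omega,
      PySem.List.pyGet?_natCast] at this
    rw [List.getElem?_eq_getElem (by omega)] at this
    rcases (by simpa using this : ((i : Int) + 1 = 0) ∨ r s[i] s[i + 1] = true) with h0 | h2
    · omega
    · simpa using h2
  · intro H p hp
    rw [PySem.List.mem_enumerate_iff] at hp
    obtain ⟨k, hk, rfl⟩ := hp
    unfold pvGuard
    rcases k with _ | j
    · simp
    · simp only [show ((0 : Int) + (j + 1 : Nat)) - 1 = ((j : Nat) : Int) by push_cast; ring,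
        PySem.List.pyGet?_natCast]
      rw [List.getElem?_eq_getElem (by omega)]
      simpa using Or.inr (H j hk)

theorem adj_iff_sorted (s : List Char) :
    (∀ i : Nat, (h : i + 1 < s.length) → decide (s[i] ≤ s[i + 1]) = true) ↔
      s = PySem.List.sorted s (fun x => x) false := by
  constructor
  · intro H
    have hp : s.Pairwise (fun a b => a ≤ b) := by
      rw [← List.isChain_iff_pairwise, List.isChain_iff_getElem]
      intro i h
      simpa using H i (by omega)
    exact (PySem.List.sorted_eq_self_of_pairwise s (fun x => x) hp).symm
  · intro H i h
    have hp : s.Pairwise (fun a b => a ≤ b) := by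
      have := PySem.List.sorted_pairwise s (fun x => x)
      rwa [← H] at this
    rw [← List.isChain_iff_pairwise, List.isChain_iff_getElem] at hp
    simpa using hp i (by omega)

theorem adj_iff_sorted_rev (s : List Char) :
    (∀ i : Nat, (h : i + 1 < s.length) → decide (s[i + 1] ≤ s[i]) = true) ↔
      s = PySem.List.sorted s (fun x => x) true := by
  haveI : Trans (fun (a b : Char) => b ≤ a) (fun (a b : Char) => b ≤ a) (fun (a b : Char) => b ≤ a) := ⟨fun h1 h2 => le_trans h2 h1⟩
  constructor
  · intro H
    have hp : s.Pairwise (fun a b => b ≤ a) := by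
      rw [← List.isChain_iff_pairwise, List.isChain_iff_getElem]
      intro i h
      simpa using H i (by omega)
    exact (PySem.List.sorted_rev_eq_self_of_pairwise s (fun x => x) hp).symm
  · intro H i h
    have hp : s.Pairwise (fun a b => b ≤ a) := by
      have := PySem.List.sorted_pairwise_rev s (fun x => x)
      rwa [← H] at this
    rw [← List.isChain_iff_pairwise, List.isChain_iff_getElem] at hp
    simpa using hp i (by omega)

theorem loop_eq_sorted (s : List Char) :
    (PySem.List.enumerate s).foldl (pvStepInc s) true =
      (s == PySem.List.sorted s (fun x => x) false) := by
  rw [show (pvStepInc s) = fun acc p => acc && pvGuard (fun c v => decide (c ≤ v)) s p from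
    funext fun b => funext fun kv => stepInc_eq s b kv, foldl_and_all]
  rw [Bool.true_and, Bool.eq_iff_iff, loop_all, beq_iff_eq]
  exact adj_iff_sorted s

theorem loop_eq_sorted_rev (s : List Char) :
    (PySem.List.enumerate s).foldl (pvStepDec s) true =
      (s == PySem.List.sorted s (fun x => x) true) := by
  rw [show (pvStepDec s) = fun acc p => acc && pvGuard (fun c v => decide (v ≤ c)) s p from
    funext fun b => funext fun kv => stepDec_eq s b kv, foldl_and_all]
  rw [Bool.true_and, Bool.eq_iff_iff, loop_all, beq_iff_eq]
  exact adj_iff_sorted_rev s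

-- ===== VERDICT (by name: the statement is the Claim_ definition above) =====
theorem isbouncy_spec : Claim_equal_isbouncy := by
  intro num _
  unfold Spec_isbouncy isbouncy isbouncy_alt
  simp only [loop_eq_sorted, loop_eq_sorted_rev]
  cases h : ((PySem.Int.toChars num == PySem.List.sorted (PySem.Int.toChars num) (fun x => x) false) ||
      (PySem.Int.toChars num == PySem.List.sorted (PySem.Int.toChars num) (fun x => x) true)) <;> simp
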